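-- pv_equiv track=rewrite | github.com/dennymin/atbs-learning-python | dictionaries-and-structuring-data/chess-dictionary-validator.py | boardGenerator
-- ===== SOURCE A (Python) =====
-- def boardGenerator(board):
--   alphas = ['a','b','c','d','e','f','g','h']
--   nums = range(1, 8)
--   fullSet = []
--   for i in range(len(nums)):
--     for j in range(len(alphas)):
--       spot = str(nums[i]) + alphas[j]
--       fullSet.append(spot)
--
--   units = ['king', 'queen', 'bishop', 'knight', 'rook', 'pawn']
--   teams = ['b', 'w']
--   fullTeam = []
--   for i in range(len(teams)):
--     for j in range(len(units)):
--       armed = teams[i] + units[j]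
--       fullTeam.append(armed)
--
--   for i in board.keys():
--     if i not in fullSet:
--       return False
--
--   tempBoard = []
--   blackPawnCounter = 0
--   whitePawnCounter = 0
--   for i in board.values():
--     if i not in fullTeam or (i in tempBoard and i != 'bpawn' and i != 'wpawn'):
--       return False
--     tempBoard.append(i)
--     if i == 'bpawn':
--       blackPawnCounter += 1
--     if i == 'wpawn':
--       whitePawnCounter += 1
--
--   if blackPawnCounter > 7 or whitePawnCounter > 7:
--     return False
--
--
--   return True
-- ===== SOURCE B (Python) =====
-- def boardGenerator(board):
--   # Validate squares by character arithmetic instead of a generated table.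
--   for k in board.keys():
--     if len(k) != 2 or k[0] not in '1234567' or k[1] not in 'abcdefgh':
--       return False
--   # Validate pieces by splitting off the colour letter.
--   for v in board.values():
--     if len(v) < 2 or v[0] not in 'bw' or v[1:] not in ('king', 'queen', 'bishop', 'knight', 'rook', 'pawn'):
--       return False
--   # Duplicates: sort the values so equal pieces are adjacent, then one scan.
--   vals = sorted(board.values())
--   for x, y in zip(vals, vals[1:]):
--     if x == y and x != 'bpawn' and x != 'wpawn':
--       return False
--   return vals.count('bpawn') <= 7 and vals.count('wpawn') <= 7
-- ===== Notes on version B (the rewrite author's own statement) =====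
-- stated objective: alternative
-- what changed: B drops A's generated square/piece tables and quadratic tempBoard scan: squares are validated by direct character tests (rank in '1234567', file in 'abcdefgh'), pieces by splitting the colour letter off the name, and duplicates are found by sorting the values and scanning adjacent pairs once.
import Mathlib
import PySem

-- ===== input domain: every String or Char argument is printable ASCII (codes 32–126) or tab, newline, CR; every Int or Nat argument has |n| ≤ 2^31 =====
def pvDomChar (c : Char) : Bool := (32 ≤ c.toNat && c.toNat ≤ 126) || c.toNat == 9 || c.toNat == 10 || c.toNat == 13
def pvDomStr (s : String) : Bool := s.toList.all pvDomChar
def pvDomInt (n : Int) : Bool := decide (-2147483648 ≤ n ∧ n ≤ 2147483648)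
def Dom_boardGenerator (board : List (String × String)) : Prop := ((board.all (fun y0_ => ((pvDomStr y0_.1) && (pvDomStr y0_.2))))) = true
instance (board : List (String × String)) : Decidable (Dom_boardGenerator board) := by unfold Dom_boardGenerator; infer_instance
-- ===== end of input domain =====

set_option maxRecDepth 10000


-- B drops A's generated square/piece tables and quadratic tempBoard scan: squares are
-- validated by direct character tests, pieces by splitting off the colour letter, and
-- duplicates by sorting the values and scanning adjacent pairs (objective: alternative).

-- ===== PORT A =====
-- fullSet: nested loops over range(len(nums)) / range(len(alphas)) with indexing, appending str(nums[i]) + alphas[j]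
def pvFullSetA : List String :=
  let alphas := ["a","b","c","d","e","f","g","h"]
  let nums := PySem.List.pyRange 1 8 1
  (PySem.List.pyRange 0 (Int.ofNat nums.length) 1).foldl (fun acc i =>
    (PySem.List.pyRange 0 (Int.ofNat alphas.length) 1).foldl (fun acc2 j =>
      acc2 ++ [PySem.Int.toStr (PySem.List.pyGetD nums i 0) ++ PySem.List.pyGetD alphas j ""]) acc) []

-- fullTeam: nested loops over range(len(teams)) / range(len(units)), appending teams[i] + units[j]
def pvFullTeamA : List String :=
  let units := ["king","queen","bishop","knight","rook","pawn"]
  let teams := ["b","w"]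
  (PySem.List.pyRange 0 (Int.ofNat teams.length) 1).foldl (fun acc i =>
    (PySem.List.pyRange 0 (Int.ofNat units.length) 1).foldl (fun acc2 j =>
      acc2 ++ [PySem.List.pyGetD teams i "" ++ PySem.List.pyGetD units j ""]) acc) []

-- 'for i in board.keys(): if i not in fullSet: return False'
def pvKeysLoopA (fullSet : List String) : List String → Bool
  | [] => true
  | k :: ks => if k ∉ fullSet then false else pvKeysLoopA fullSet ks

-- 'for i in board.values(): …' with tempBoard and the two pawn counters; the trailing
-- pawn-cap check is the base case (reached only when the loop does not return early)
def pvValuesLoopA (fullTeam : List String) : List String → List String → Int → Int → Bool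
  | [], _, bp, wp => if bp > 7 ∨ wp > 7 then false else true
  | v :: vs, temp, bp, wp =>
      if v ∉ fullTeam ∨ (v ∈ temp ∧ v ≠ "bpawn" ∧ v ≠ "wpawn") then false
      else pvValuesLoopA fullTeam vs (temp ++ [v])
             (if v = "bpawn" then bp + 1 else bp)
             (if v = "wpawn" then wp + 1 else wp)

def boardGenerator (board : List (String × String)) : Bool :=
  let d := PySem.Dict.ofList board
  if pvKeysLoopA pvFullSetA d.keys then
    pvValuesLoopA pvFullTeamA d.values [] 0 0
  else false

-- ===== PORT B =====
-- not (len(k) != 2 or k[0] not in '1234567' or k[1] not in 'abcdefgh')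
def pvKeyOk (k : String) : Bool :=
  if k.toList.length ≠ 2 then false
  else "1234567".toList.contains (k.toList.getD 0 ' ') &&
       "abcdefgh".toList.contains (k.toList.getD 1 ' ')

-- not (len(v) < 2 or v[0] not in 'bw' or v[1:] not in (units))
def pvPieceOk (v : String) : Bool :=
  if v.toList.length < 2 then false
  else "bw".toList.contains (v.toList.getD 0 ' ') &&
       ["king","queen","bishop","knight","rook","pawn"].contains (String.ofList (v.toList.drop 1))

def boardGenerator_alt (board : List (String × String)) : Bool :=
  let d := PySem.Dict.ofList board
  if !(d.keys.all pvKeyOk) then false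
  else if !(d.values.all pvPieceOk) then false
  else
    let vals := PySem.List.sorted d.values (fun x => x) false
    if !((vals.zip (vals.drop 1)).all fun p =>
          !(p.1 == p.2 && p.1 != "bpawn" && p.1 != "wpawn")) then false
    else decide (vals.count "bpawn" ≤ 7) && decide (vals.count "wpawn" ≤ 7)

-- ===== PRECONDITION & SPEC =====
def Spec_boardGenerator (board : List (String × String)) (out : Bool) : Prop := out = boardGenerator_alt board
instance (board : List (String × String)) (out : Bool) : Decidable (Spec_boardGenerator board out) := by unfold Spec_boardGenerator; infer_instance

-- ===== CLAIM =====
def Claim_equal_boardGenerator : Prop := ∀ (board : List (String × String)), Dom_boardGenerator board → Spec_boardGenerator board (boardGenerator board)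

-- ===== LEMMAS AND PROOFS =====

theorem pvFullSetA_flatMap :
    pvFullSetA = ['1','2','3','4','5','6','7'].flatMap (fun d =>
      ['a','b','c','d','e','f','g','h'].map (fun a => String.ofList [d, a])) := by decide

theorem pvFullTeamA_flatMap :
    pvFullTeamA = ['b','w'].flatMap (fun t =>
      ["king","queen","bishop","knight","rook","pawn"].map
        (fun u => String.ofList (t :: u.toList))) := by decide

theorem pvOfList_injective : Function.Injective String.ofList := by
  intro a b h
  have := congrArg String.toList h
  simpa using this

theorem pvKeyOk_eq (k : String) : pvKeyOk k = decide (k ∈ pvFullSetA) := by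
  rw [pvFullSetA_flatMap]
  have hmem : (k ∈ ['1','2','3','4','5','6','7'].flatMap (fun d =>
      ['a','b','c','d','e','f','g','h'].map (fun a => String.ofList [d, a]))) ↔
      ∃ d ∈ ['1','2','3','4','5','6','7'], ∃ a ∈ ['a','b','c','d','e','f','g','h'],
        k.toList = [d, a] := by
    simp only [List.mem_flatMap, List.mem_map]
    constructor
    · rintro ⟨d, hd, a, ha, rfl⟩; exact ⟨d, hd, a, ha, by simp⟩
    · rintro ⟨d, hd, a, ha, h⟩
      exact ⟨d, hd, a, ha, by rw [← String.toList_inj]; simp [h]⟩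
  rw [Bool.eq_iff_iff, decide_eq_true_eq, hmem]
  unfold pvKeyOk
  rcases hk : k.toList with _ | ⟨c1, _ | ⟨c2, _ | ⟨c3, rest⟩⟩⟩
  · simp [hk]
  · simp [hk]
  · have h7 : ("1234567" : String).toList = ['1','2','3','4','5','6','7'] := by decide
    have h8 : ("abcdefgh" : String).toList = ['a','b','c','d','e','f','g','h'] := by decide
    simp only [hk, List.length_cons, List.length_nil, h7, h8, List.getD_cons_zero,
      List.getD_cons_succ, List.contains_eq_mem, Bool.and_eq_true, decide_eq_true_eq]
    rw [if_neg (by simp)]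
    simp only [Bool.and_eq_true, List.contains_eq_mem, decide_eq_true_eq]
    constructor
    · rintro ⟨h1, h2⟩; exact ⟨c1, h1, c2, h2, rfl⟩
    · rintro ⟨d, hd, a, ha, h⟩
      simp only [List.cons.injEq, and_true] at h
      exact ⟨h.1 ▸ hd, h.2 ▸ ha⟩
  · simp [hk]

def pvUnitsC : List (List Char) :=
  [['k','i','n','g'], ['q','u','e','e','n'], ['b','i','s','h','o','p'],
   ['k','n','i','g','h','t'], ['r','o','o','k'], ['p','a','w','n']]

theorem pvPieceOk_eq (v : String) : pvPieceOk v = decide (v ∈ pvFullTeamA) := by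
  rw [pvFullTeamA_flatMap]
  have hunits : ["king","queen","bishop","knight","rook","pawn"] = pvUnitsC.map String.ofList := by decide
  have hmem : (v ∈ ['b','w'].flatMap (fun t =>
      ["king","queen","bishop","knight","rook","pawn"].map
        (fun u => String.ofList (t :: u.toList)))) ↔
      ∃ t ∈ ['b','w'], ∃ u ∈ pvUnitsC, v.toList = t :: u := by
    rw [hunits]
    simp only [List.mem_flatMap, List.mem_map]
    constructor
    · rintro ⟨t, ht, u, ⟨uc, huc, rfl⟩, rfl⟩
      exact ⟨t, ht, uc, huc, by simp⟩
    · rintro ⟨t, ht, uc, huc, h⟩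
      refine ⟨t, ht, String.ofList uc, ⟨uc, huc, rfl⟩, ?_⟩
      rw [← String.toList_inj]; simp [h]
  rw [Bool.eq_iff_iff, decide_eq_true_eq, hmem]
  unfold pvPieceOk
  have hcont : ∀ rest : List Char,
      (["king","queen","bishop","knight","rook","pawn"].contains (String.ofList rest))
        = pvUnitsC.contains rest := by
    intro rest
    rw [hunits, List.contains_eq_mem, List.contains_eq_mem, decide_eq_decide]
    exact List.mem_map_of_injective pvOfList_injective
  rcases hv : v.toList with _ | ⟨c, _ | ⟨c2, rest⟩⟩
  · simp [hv]
  · -- one char: length < 2, and no unit name is empty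
    simp only [hv, List.length_cons, List.length_nil]
    rw [if_pos (by omega)]
    simp only [Bool.false_eq_true, false_iff]
    rintro ⟨t, ht, uc, huc, h⟩
    simp only [List.cons.injEq] at h
    obtain ⟨rfl, h2⟩ := h
    subst h2
    exact absurd huc (by decide)
  · have hbw : ("bw" : String).toList = ['b','w'] := by decide
    simp only [hv, List.length_cons, hbw, List.getD_cons_zero, List.drop_succ_cons,
      List.drop_zero]
    rw [if_neg (by omega), hcont]
    simp only [Bool.and_eq_true, List.contains_eq_mem, decide_eq_true_eq]
    constructor
    · rintro ⟨h1, h2⟩; exact ⟨c, h1, c2 :: rest, h2, rfl⟩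
    · rintro ⟨t, ht, uc, huc, h⟩
      simp only [List.cons.injEq] at h
      exact ⟨h.1 ▸ ht, h.2 ▸ huc⟩

theorem pvKeysLoopA_eq_all (fs : List String) (ks : List String) :
    pvKeysLoopA fs ks = ks.all (fun k => decide (k ∈ fs)) := by
  induction ks with
  | nil => rfl
  | cons k ks ih =>
      by_cases h : k ∈ fs <;> simp [pvKeysLoopA, h, ih]

-- the values loop without the counters (duplicate/team check alone)
def pvGoodRec (ft : List String) : List String → List String → Bool
  | [], _ => true
  | v :: vs, temp =>
      if v ∉ ft ∨ (v ∈ temp ∧ v ≠ "bpawn" ∧ v ≠ "wpawn") then false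
      else pvGoodRec ft vs (temp ++ [v])

theorem pvValuesLoopA_split (ft : List String) (vs temp : List String) (bp wp : Int) :
    pvValuesLoopA ft vs temp bp wp =
      (pvGoodRec ft vs temp &&
        (decide (bp + (vs.count "bpawn" : Int) ≤ 7) && decide (wp + (vs.count "wpawn" : Int) ≤ 7))) := by
  induction vs generalizing temp bp wp with
  | nil =>
      simp only [pvValuesLoopA, pvGoodRec, List.count_nil, Int.natCast_zero, add_zero,
        Bool.true_and]
      split
      · rename_i h
        rcases h with h | h <;> simp [not_le.mpr h]
      · rename_i h
        push_neg at h
        simp [h.1, h.2]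
  | cons v vs ih =>
      by_cases hc : v ∉ ft ∨ (v ∈ temp ∧ v ≠ "bpawn" ∧ v ≠ "wpawn")
      · simp [pvValuesLoopA, pvGoodRec, hc]
      · simp only [pvValuesLoopA, pvGoodRec, if_neg hc]
        rw [ih]
        have hb : (if v = "bpawn" then bp + 1 else bp) + (vs.count "bpawn" : Int)
            = bp + ((v :: vs).count "bpawn" : Int) := by
          by_cases hv : v = "bpawn" <;> simp [List.count_cons, hv] <;> push_cast <;> ring
        have hw : (if v = "wpawn" then wp + 1 else wp) + (vs.count "wpawn" : Int)
            = wp + ((v :: vs).count "wpawn" : Int) := by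
          by_cases hv : v = "wpawn" <;> simp [List.count_cons, hv] <;> push_cast <;> ring
        rw [hb, hw]

theorem pvGoodRec_iff (ft : List String) (vs : List String) : ∀ (temp : List String),
    pvGoodRec ft vs temp = true ↔
      ∀ v ∈ vs, v ∈ ft ∧ (v = "bpawn" ∨ v = "wpawn" ∨ (v ∉ temp ∧ vs.count v ≤ 1)) := by
  induction vs with
  | nil => intro temp; simp [pvGoodRec]
  | cons v vs ih =>
      intro temp
      simp only [pvGoodRec]
      split
      · rename_i h
        simp only [Bool.false_eq_true, false_iff]
        intro H
        obtain ⟨hft, hrest⟩ := H v (List.mem_cons_self ..)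
        rcases h with h | ⟨ht, hb, hw⟩
        · exact h hft
        · rcases hrest with hc | hc | ⟨hnt, _⟩
          · exact hb hc
          · exact hw hc
          · exact hnt ht
      · rename_i h
        push_neg at h
        obtain ⟨hft, hdup⟩ := h
        rw [ih (temp ++ [v])]
        constructor
        · intro H
          intro u hu
          rcases List.mem_cons.mp hu with rfl | hu
          · refine ⟨hft, ?_⟩
            by_cases hb : u = "bpawn"; · exact Or.inl hb
            by_cases hw : u = "wpawn"; · exact Or.inr (Or.inl hw)
            have hnt : u ∉ temp := fun ht => hw (hdup ht hb)
            refine Or.inr (Or.inr ⟨hnt, ?_⟩)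
            have hnv : u ∉ vs := by
              intro hv
              rcases (H u hv).2 with hc | hc | ⟨hnt', _⟩
              · exact hb hc
              · exact hw hc
              · exact hnt' (List.mem_append.mpr (Or.inr (List.mem_singleton.mpr rfl)))
            simp [List.count_cons, List.count_eq_zero.mpr hnv]
          · obtain ⟨huf, hrest⟩ := H u hu
            refine ⟨huf, ?_⟩
            rcases hrest with hc | hc | ⟨hnt, hcnt⟩
            · exact Or.inl hc
            · exact Or.inr (Or.inl hc)
            · refine Or.inr (Or.inr ⟨fun ht => hnt (List.mem_append.mpr (Or.inl ht)), ?_⟩)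
              have huv : u ≠ v := by
                intro rfl'
                exact hnt (List.mem_append.mpr (Or.inr (by simp [rfl'])))
              have hvu : ¬ v = u := fun hh => huv hh.symm
              calc (v :: vs).count u = vs.count u := by simp [List.count_cons, huv, hvu]
                _ ≤ 1 := hcnt
        · intro H u hu
          obtain ⟨huf, hrest⟩ := H u (List.mem_cons_of_mem _ hu)
          refine ⟨huf, ?_⟩
          rcases hrest with hc | hc | ⟨hnt, hcnt⟩
          · exact Or.inl hc
          · exact Or.inr (Or.inl hc)
          · have huv : u ≠ v := by
              intro rfl'
              have : 1 + vs.count u ≤ 1 := by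
                simpa [List.count_cons, rfl', Nat.add_comm] using hcnt
              have : vs.count u = 0 := by omega
              exact (List.count_eq_zero.mp this) hu
            refine Or.inr (Or.inr ⟨?_, ?_⟩)
            · intro hmem
              rcases List.mem_append.mp hmem with hm | hm
              · exact hnt hm
              · exact huv (List.mem_singleton.mp hm)
            · have hvu : ¬ v = u := fun hh => huv hh.symm
              calc vs.count u = (v :: vs).count u := by simp [List.count_cons, huv, hvu]
                _ ≤ 1 := hcnt

-- B's adjacent scan on a (≤)-sorted list detects exactly the non-pawn values of count ≥ 2
theorem pvAdjAll_iff (l : List String) (hs : l.Pairwise (· ≤ ·)) :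
    ((l.zip (l.drop 1)).all (fun p =>
        !(p.1 == p.2 && p.1 != "bpawn" && p.1 != "wpawn")) = true)
    ↔ ∀ v ∈ l, v ≠ "bpawn" → v ≠ "wpawn" → l.count v ≤ 1 := by
  induction l with
  | nil => simp
  | cons x t ih =>
    cases t with
    | nil =>
        simp [List.count_cons]
    | cons y t' =>
        have hxy : x ≤ y := (List.pairwise_cons.mp hs).1 y (List.mem_cons_self ..)
        have hxall : ∀ z ∈ y :: t', x ≤ z := (List.pairwise_cons.mp hs).1
        have htl : (y :: t').Pairwise (· ≤ ·) := (List.pairwise_cons.mp hs).2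
        have hyall : ∀ z ∈ t', y ≤ z := (List.pairwise_cons.mp htl).1
        have hzip : ((x :: y :: t').zip ((x :: y :: t').drop 1))
            = (x, y) :: ((y :: t').zip ((y :: t').drop 1)) := by simp
        rw [hzip, List.all_cons, Bool.and_eq_true, ih htl]
        have hhead : (!(x == y && x != "bpawn" && x != "wpawn")) = true ↔
            ¬ (x = y ∧ x ≠ "bpawn" ∧ x ≠ "wpawn") := by
          simp only [Bool.not_eq_true', Bool.and_eq_false_iff, beq_eq_false_iff_ne, ne_eq,
            bne_eq_false_iff_eq]
          tauto
        rw [hhead]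
        constructor
        · rintro ⟨h1, h2⟩ v hv hb hw
          have hnotin : v = x → v ∉ y :: t' := by
            rintro rfl hin
            rcases List.mem_cons.mp hin with rfl | hin
            · exact h1 ⟨rfl, hb, hw⟩
            · exact h1 ⟨le_antisymm hxy (hyall _ hin), hb, hw⟩
          rcases List.mem_cons.mp hv with rfl | hin
          · have : (y :: t').count v = 0 := List.count_eq_zero.mpr (hnotin rfl)
            simp [List.count_cons, this]
          · have h2' := h2 v hin hb hw
            by_cases hvx : v = x
            · exact absurd hin (hnotin hvx)
            · have hxv : ¬ x = v := fun h => hvx h.symm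
              simp [List.count_cons, hxv] at h2' ⊢
              omega
        · intro H
          constructor
          · rintro ⟨rfl, hb, hw⟩
            have := H x (List.mem_cons_self ..) hb hw
            simp [List.count_cons] at this
          · intro v hv hb hw
            have := H v (List.mem_cons_of_mem _ hv) hb hw
            have hle : (y :: t').count v ≤ (x :: y :: t').count v := by
              simp only [List.count_cons]
              split <;> omega
            omega

theorem boardGenerator_eq_alt (board : List (String × String)) :
    boardGenerator board = boardGenerator_alt board := by
  unfold boardGenerator boardGenerator_alt
  simp only []
  set ks := (PySem.Dict.ofList board).keys with hks
  set vs := (PySem.Dict.ofList board).values with hvs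
  have hkeys : pvKeysLoopA pvFullSetA ks = ks.all pvKeyOk := by
    rw [pvKeysLoopA_eq_all]
    congr 1
    funext k
    exact (pvKeyOk_eq k).symm
  rw [hkeys]
  cases hA : ks.all pvKeyOk with
  | false => simp
  | true =>
      simp only [Bool.not_true, Bool.false_eq_true, if_false, if_true, Bool.not_eq_true']
      set svals := PySem.List.sorted vs (fun x => x) false with hsv
      have hperm : svals.Perm vs := PySem.List.sorted_perm ..
      have hpw : svals.Pairwise (· ≤ ·) := PySem.List.sorted_pairwise ..
      have hcb : svals.count "bpawn" = vs.count "bpawn" := hperm.count_eq _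
      have hcw : svals.count "wpawn" = vs.count "wpawn" := hperm.count_eq _
      rw [pvValuesLoopA_split]
      have hgood : pvGoodRec pvFullTeamA vs [] =
          (vs.all pvPieceOk &&
            ((svals.zip (svals.drop 1)).all (fun p =>
              !(p.1 == p.2 && p.1 != "bpawn" && p.1 != "wpawn")))) := by
        rw [Bool.eq_iff_iff, Bool.and_eq_true, pvGoodRec_iff, pvAdjAll_iff svals hpw]
        have hall : vs.all pvPieceOk = true ↔ ∀ v ∈ vs, v ∈ pvFullTeamA := by
          rw [show pvPieceOk = (fun v => decide (v ∈ pvFullTeamA)) from funext pvPieceOk_eq]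
          simp
        rw [hall]
        constructor
        · intro H
          refine ⟨fun v hv => (H v hv).1, fun v hv hb hw => ?_⟩
          have hv' : v ∈ vs := hperm.mem_iff.mp hv
          rcases (H v hv').2 with hc | hc | ⟨_, hc⟩
          · exact absurd hc hb
          · exact absurd hc hw
          · rw [hperm.count_eq]; exact hc
        · rintro ⟨H1, H2⟩ v hv
          refine ⟨H1 v hv, ?_⟩
          by_cases hb : v = "bpawn"; · exact Or.inl hb
          by_cases hw : v = "wpawn"; · exact Or.inr (Or.inl hw)
          refine Or.inr (Or.inr ⟨by simp, ?_⟩)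
          have := H2 v (hperm.mem_iff.mpr hv) hb hw
          rw [hperm.count_eq] at this
          exact this
      rw [hgood]
      cases hP : vs.all pvPieceOk with
      | false => simp
      | true =>
          simp only [Bool.true_and, Bool.not_eq_true']
          cases hJ : (svals.zip (svals.drop 1)).all (fun p =>
              !(p.1 == p.2 && p.1 != "bpawn" && p.1 != "wpawn")) with
          | false => simp
          | true =>
              simp only [Bool.true_and, Bool.false_eq_true, if_false]
              rw [hcb, hcw]
              have h1 : decide ((0:Int) + (vs.count "bpawn" : Int) ≤ 7) = decide (vs.count "bpawn" ≤ 7) := by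
                rw [decide_eq_decide]; omega
              have h2 : decide ((0:Int) + (vs.count "wpawn" : Int) ≤ 7) = decide (vs.count "wpawn" ≤ 7) := by
                rw [decide_eq_decide]; omega
              rw [h1, h2]
              simp

-- ===== VERDICT =====
theorem boardGenerator_spec : Claim_equal_boardGenerator := by
  intro board _
  unfold Spec_boardGenerator
  exact boardGenerator_eq_alt board
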